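-- pv_equiv track=rewrite | github.com/Ansh145245/kvgcs-timetable-server | kvgcs_server.py | extract_subject_code
-- ===== SOURCE A (Python) =====
-- def extract_subject_code(teacher_name):
--     name_upper = teacher_name.upper()
--     if 'MATHS' in name_upper:
--         return 'MATH'
--     elif 'ENG' in name_upper:
--         return 'ENG'
--     elif 'SST' in name_upper:
--         return 'SST'
--     elif 'SC' in name_upper:
--         return 'SCI'
--     elif 'HINDI' in name_upper:
--         return 'HIN'
--     elif 'COMPUTER' in name_upper:
--         return 'COMP'
--     elif any(x in name_upper for x in ['GAMES', 'PHE']):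
--         return 'PE'
--     elif 'SKT' in name_upper:
--         return 'SKT'
--     elif 'LIB' in name_upper:
--         return 'LIB'
--     elif 'AE' in name_upper:
--         return 'AE'
--     elif 'VE' in name_upper:
--         return 'VE'
--     return ''
-- ===== SOURCE B (Python) =====
-- # Different algorithm: one left-to-right pass over the string positions, keeping the best
-- # (lowest) priority of any keyword that starts at some position; the winner's code is looked
-- # up at the end. A instead runs 12 separate full substring searches in a branch cascade.
-- _KW_PRIORITY = [('MATHS', 0), ('ENG', 1), ('SST', 2), ('SC', 3), ('HINDI', 4),
--                 ('COMPUTER', 5), ('GAMES', 6), ('PHE', 6), ('SKT', 7),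
--                 ('LIB', 8), ('AE', 9), ('VE', 10)]
-- _CODES = ['MATH', 'ENG', 'SST', 'SCI', 'HIN', 'COMP', 'PE', 'SKT', 'LIB', 'AE', 'VE', '']
--
-- def extract_subject_code(teacher_name):
--     u = teacher_name.upper()
--     best = 11
--     for i in range(len(u)):
--         for kw, pr in _KW_PRIORITY:
--             if pr < best and u.startswith(kw, i):
--                 best = pr
--     return _CODES[best]
-- ===== Notes on version B (the rewrite author's own statement) =====
-- stated objective: alternative
-- what changed: Replaces the 12-branch cascade of independent full substring searches by a single left-to-right scan over the string's positions that keeps the minimum priority of any keyword starting at each position, then maps the winning priority to its code.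
import Mathlib
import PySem

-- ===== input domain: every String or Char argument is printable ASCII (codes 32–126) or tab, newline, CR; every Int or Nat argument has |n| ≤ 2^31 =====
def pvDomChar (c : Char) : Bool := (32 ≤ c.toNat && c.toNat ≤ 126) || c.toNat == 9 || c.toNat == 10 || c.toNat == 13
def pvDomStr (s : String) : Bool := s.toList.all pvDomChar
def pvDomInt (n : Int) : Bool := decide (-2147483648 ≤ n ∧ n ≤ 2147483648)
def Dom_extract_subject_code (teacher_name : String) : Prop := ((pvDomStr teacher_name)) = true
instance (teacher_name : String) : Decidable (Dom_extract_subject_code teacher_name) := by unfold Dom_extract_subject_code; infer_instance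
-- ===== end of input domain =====

-- B replaces A's cascade of 12 independent substring searches by one positional scan keeping a running minimum priority (alternative algorithm, same cost).


-- ===== PORT A =====
-- Port of A: the if/elif cascade, branch for branch.
def extract_subject_code (teacher_name : String) : String :=
  let name_upper := PySem.Str.upper teacher_name
  if PySem.Str.isIn "MATHS" name_upper then "MATH"
  else if PySem.Str.isIn "ENG" name_upper then "ENG"
  else if PySem.Str.isIn "SST" name_upper then "SST"
  else if PySem.Str.isIn "SC" name_upper then "SCI"
  else if PySem.Str.isIn "HINDI" name_upper then "HIN"
  else if PySem.Str.isIn "COMPUTER" name_upper then "COMP"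
  else if ["GAMES", "PHE"].any (fun x => PySem.Str.isIn x name_upper) then "PE"
  else if PySem.Str.isIn "SKT" name_upper then "SKT"
  else if PySem.Str.isIn "LIB" name_upper then "LIB"
  else if PySem.Str.isIn "AE" name_upper then "AE"
  else if PySem.Str.isIn "VE" name_upper then "VE"
  else ""

-- ===== PORT B =====
-- Port of B: one pass over the positions of the uppercased name; at each position every
-- keyword starting there lowers the running minimum priority; the winner's code is looked up.
def kwPriority : List (List Char × Nat) :=
  [("MATHS".toList, 0), ("ENG".toList, 1), ("SST".toList, 2), ("SC".toList, 3),
   ("HINDI".toList, 4), ("COMPUTER".toList, 5), ("GAMES".toList, 6), ("PHE".toList, 6),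
   ("SKT".toList, 7), ("LIB".toList, 8), ("AE".toList, 9), ("VE".toList, 10)]

def codesTable : List String :=
  ["MATH", "ENG", "SST", "SCI", "HIN", "COMP", "PE", "SKT", "LIB", "AE", "VE", ""]

-- Python's u.startswith(kw, i) is exactly 'kw is a prefix of u.drop i' (i ranges over 0..len-1).
def innerStep (u : List Char) (i : Nat) (b : Nat) : Nat :=
  kwPriority.foldl (fun b p => if p.2 < b ∧ p.1.isPrefixOf (u.drop i) = true then p.2 else b) b

def bestOf (u : List Char) : Nat :=
  (List.range u.length).foldl (fun b i => innerStep u i b) 11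

def extract_subject_code_alt (teacher_name : String) : String :=
  let u := (PySem.Str.upper teacher_name).toList
  codesTable.getD (bestOf u) ""

-- ===== PRECONDITION & SPEC =====
def Spec_extract_subject_code (teacher_name : String) (out : String) : Prop := out = extract_subject_code_alt teacher_name
instance (teacher_name : String) (out : String) : Decidable (Spec_extract_subject_code teacher_name out) := by unfold Spec_extract_subject_code; infer_instance

-- ===== CLAIM =====
def Claim_equal_extract_subject_code : Prop := ∀ (teacher_name : String), Dom_extract_subject_code teacher_name → Spec_extract_subject_code teacher_name (extract_subject_code teacher_name)

-- ===== LEMMAS AND PROOFS =====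

theorem pv_foldl_le_init {α : Type} (f : Nat → α → Nat) (h : ∀ a x, f a x ≤ a) :
    ∀ (l : List α) (a : Nat), l.foldl f a ≤ a := by
  intro l
  induction l with
  | nil => intro a; exact le_rfl
  | cons x t ih => intro a; exact le_trans (ih (f a x)) (h a x)

theorem pv_foldl_le_of_mem {α : Type} (f : Nat → α → Nat) (x : α) (pr : Nat)
    (h : ∀ a y, f a y ≤ a) (hx : ∀ a, f a x ≤ pr) :
    ∀ (l : List α), x ∈ l → ∀ a, l.foldl f a ≤ pr := by
  intro l
  induction l with
  | nil => intro hm; cases hm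
  | cons y t ih =>
      intro hm a
      rcases List.mem_cons.mp hm with rfl | hm'
      · exact le_trans (pv_foldl_le_init f h t (f a x)) (hx a)
      · exact ih hm' (f a y)

theorem pv_foldl_inv {α β : Type} (f : β → α → β) (P : β → Prop) :
    ∀ (l : List α) (b : β), P b → (∀ b a, a ∈ l → P b → P (f b a)) → P (l.foldl f b) := by
  intro l
  induction l with
  | nil => intro b hb _; exact hb
  | cons x t ih =>
      intro b hb hstep
      exact ih (f b x) (hstep b x (List.mem_cons_self) hb)
        (fun b' a ha hb' => hstep b' a (List.mem_cons_of_mem _ ha) hb')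

theorem innerStep_le (u : List Char) (i b : Nat) : innerStep u i b ≤ b := by
  unfold innerStep
  apply pv_foldl_le_init
  intro a p
  dsimp only
  split_ifs with h
  · exact le_of_lt h.1
  · exact le_rfl

theorem innerStep_hits (u : List Char) (i : Nat) (p : List Char × Nat)
    (hmem : p ∈ kwPriority) (hpre : p.1.isPrefixOf (u.drop i) = true) (b : Nat) :
    innerStep u i b ≤ p.2 := by
  unfold innerStep
  refine pv_foldl_le_of_mem _ p p.2 ?_ ?_ kwPriority hmem b
  · intro a q
    dsimp only
    split_ifs with h
    · exact le_of_lt h.1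
    · exact le_rfl
  · intro a
    dsimp only
    split_ifs with h
    · exact le_rfl
    · by_cases hlt : p.2 < a
      · exact absurd ⟨hlt, hpre⟩ h
      · omega

theorem innerStep_cases (u : List Char) (i b : Nat) :
    innerStep u i b = b ∨
      ∃ p ∈ kwPriority, innerStep u i b = p.2 ∧ p.1.isPrefixOf (u.drop i) = true := by
  unfold innerStep
  refine pv_foldl_inv _ (fun v => v = b ∨ ∃ p ∈ kwPriority, v = p.2 ∧ p.1.isPrefixOf (u.drop i) = true)
    kwPriority b (Or.inl rfl) ?_
  intro v p hmem hv
  split_ifs with h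
  · exact Or.inr ⟨p, hmem, rfl, h.2⟩
  · exact hv

theorem bestOf_le (u : List Char) (p : List Char × Nat) (i : Nat)
    (hmem : p ∈ kwPriority) (hi : i < u.length) (hpre : p.1.isPrefixOf (u.drop i) = true) :
    bestOf u ≤ p.2 := by
  unfold bestOf
  exact pv_foldl_le_of_mem _ i p.2 (fun a y => innerStep_le u y a)
    (fun a => innerStep_hits u i p hmem hpre a)
    (List.range u.length) (List.mem_range.mpr hi) 11

theorem bestOf_cases (u : List Char) :
    bestOf u = 11 ∨
      ∃ p ∈ kwPriority, bestOf u = p.2 ∧ ∃ i, i < u.length ∧ p.1.isPrefixOf (u.drop i) = true := by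
  unfold bestOf
  refine pv_foldl_inv _
    (fun v => v = 11 ∨ ∃ p ∈ kwPriority, v = p.2 ∧ ∃ i, i < u.length ∧ p.1.isPrefixOf (u.drop i) = true)
    (List.range u.length) 11 (Or.inl rfl) ?_
  intro v i hi hv
  rcases innerStep_cases u i v with he | ⟨p, hmem, he, hpre⟩
  · rw [he]; exact hv
  · exact Or.inr ⟨p, hmem, he, i, List.mem_range.mp hi, hpre⟩

theorem kw_ne_nil : ∀ p ∈ kwPriority, p.1 ≠ [] := by decide

theorem pr_le_ten : ∀ p ∈ kwPriority, p.2 ≤ 10 := by decide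

theorem occ_iff (kw : List Char) (u : List Char) (hne : kw ≠ []) :
    PySem.Chars.isIn kw u = true ↔ ∃ i, i < u.length ∧ kw.isPrefixOf (u.drop i) = true := by
  constructor
  · intro h
    rcases (PySem.Chars.exists_prefix_drop_iff_isIn (sub := kw) (s := u)).mpr h with ⟨j, hj⟩
    by_cases hjl : j < u.length
    · exact ⟨j, hjl, List.isPrefixOf_iff_prefix.mpr hj⟩
    · exfalso
      rw [List.drop_eq_nil_of_le (le_of_not_gt hjl)] at hj
      exact hne (List.prefix_nil.mp hj)
  · rintro ⟨i, _, hpre⟩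
    exact (PySem.Chars.exists_prefix_drop_iff_isIn (sub := kw) (s := u)).mp
      ⟨i, List.isPrefixOf_iff_prefix.mp hpre⟩

theorem bestOf_eq (u : List Char) (p : List Char × Nat) (hmem : p ∈ kwPriority)
    (hocc : PySem.Chars.isIn p.1 u = true)
    (hlow : ∀ q ∈ kwPriority, q.2 < p.2 → PySem.Chars.isIn q.1 u = false) :
    bestOf u = p.2 := by
  rcases (occ_iff p.1 u (kw_ne_nil p hmem)).mp hocc with ⟨i, hi, hpre⟩
  have h1 : bestOf u ≤ p.2 := bestOf_le u p i hmem hi hpre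
  rcases bestOf_cases u with h11 | ⟨q, hqmem, hq, i', hi', hpre'⟩
  · have := pr_le_ten p hmem; omega
  · by_cases hlt : q.2 < p.2
    · have hocc' : PySem.Chars.isIn q.1 u = true :=
        (occ_iff q.1 u (kw_ne_nil q hqmem)).mpr ⟨i', hi', hpre'⟩
      rw [hlow q hqmem hlt] at hocc'
      cases hocc'
    · omega

-- ===== VERDICT =====
theorem extract_subject_code_spec : Claim_equal_extract_subject_code := by
  intro t _
  unfold Spec_extract_subject_code extract_subject_code extract_subject_code_alt
  simp only [PySem.Str.isIn_eq, List.any_cons, List.any_nil, Bool.or_false]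
  by_cases h0 : PySem.Chars.isIn "MATHS".toList ((PySem.Str.upper t).toList) = true
  · rw [if_pos h0]
    rw [bestOf_eq ((PySem.Str.upper t).toList) ("MATHS".toList, 0) (by decide) h0 ?low]
    · rfl
    case low =>
      intro q hq hlt
      fin_cases hq <;> simp_all
  by_cases h1 : PySem.Chars.isIn "ENG".toList ((PySem.Str.upper t).toList) = true
  · rw [if_neg h0, if_pos h1]
    rw [bestOf_eq ((PySem.Str.upper t).toList) ("ENG".toList, 1) (by decide) h1 ?low]
    · rfl
    case low =>
      intro q hq hlt
      fin_cases hq <;> simp_all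
  by_cases h2 : PySem.Chars.isIn "SST".toList ((PySem.Str.upper t).toList) = true
  · rw [if_neg h0, if_neg h1, if_pos h2]
    rw [bestOf_eq ((PySem.Str.upper t).toList) ("SST".toList, 2) (by decide) h2 ?low]
    · rfl
    case low =>
      intro q hq hlt
      fin_cases hq <;> simp_all
  by_cases h3 : PySem.Chars.isIn "SC".toList ((PySem.Str.upper t).toList) = true
  · rw [if_neg h0, if_neg h1, if_neg h2, if_pos h3]
    rw [bestOf_eq ((PySem.Str.upper t).toList) ("SC".toList, 3) (by decide) h3 ?low]
    · rfl
    case low =>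
      intro q hq hlt
      fin_cases hq <;> simp_all
  by_cases h4 : PySem.Chars.isIn "HINDI".toList ((PySem.Str.upper t).toList) = true
  · rw [if_neg h0, if_neg h1, if_neg h2, if_neg h3, if_pos h4]
    rw [bestOf_eq ((PySem.Str.upper t).toList) ("HINDI".toList, 4) (by decide) h4 ?low]
    · rfl
    case low =>
      intro q hq hlt
      fin_cases hq <;> simp_all
  by_cases h5 : PySem.Chars.isIn "COMPUTER".toList ((PySem.Str.upper t).toList) = true
  · rw [if_neg h0, if_neg h1, if_neg h2, if_neg h3, if_neg h4, if_pos h5]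
    rw [bestOf_eq ((PySem.Str.upper t).toList) ("COMPUTER".toList, 5) (by decide) h5 ?low]
    · rfl
    case low =>
      intro q hq hlt
      fin_cases hq <;> simp_all
  by_cases h6 : PySem.Chars.isIn "GAMES".toList ((PySem.Str.upper t).toList) = true
  · rw [if_neg h0, if_neg h1, if_neg h2, if_neg h3, if_neg h4, if_neg h5, if_pos (by simp only [h6, Bool.true_or])]
    rw [bestOf_eq ((PySem.Str.upper t).toList) ("GAMES".toList, 6) (by decide) h6 ?low]
    · rfl
    case low =>
      intro q hq hlt
      fin_cases hq <;> simp_all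
  by_cases h7 : PySem.Chars.isIn "PHE".toList ((PySem.Str.upper t).toList) = true
  · rw [if_neg h0, if_neg h1, if_neg h2, if_neg h3, if_neg h4, if_neg h5, if_pos (by rw [eq_false_of_ne_true h6, h7]; decide)]
    rw [bestOf_eq ((PySem.Str.upper t).toList) ("PHE".toList, 6) (by decide) h7 ?low]
    · rfl
    case low =>
      intro q hq hlt
      fin_cases hq <;> simp_all
  by_cases h8 : PySem.Chars.isIn "SKT".toList ((PySem.Str.upper t).toList) = true
  · rw [if_neg h0, if_neg h1, if_neg h2, if_neg h3, if_neg h4, if_neg h5, if_neg (by rw [eq_false_of_ne_true h6, eq_false_of_ne_true h7]; decide), if_pos h8]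
    rw [bestOf_eq ((PySem.Str.upper t).toList) ("SKT".toList, 7) (by decide) h8 ?low]
    · rfl
    case low =>
      intro q hq hlt
      fin_cases hq <;> simp_all
  by_cases h9 : PySem.Chars.isIn "LIB".toList ((PySem.Str.upper t).toList) = true
  · rw [if_neg h0, if_neg h1, if_neg h2, if_neg h3, if_neg h4, if_neg h5, if_neg (by rw [eq_false_of_ne_true h6, eq_false_of_ne_true h7]; decide), if_neg h8, if_pos h9]
    rw [bestOf_eq ((PySem.Str.upper t).toList) ("LIB".toList, 8) (by decide) h9 ?low]
    · rfl
    case low =>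
      intro q hq hlt
      fin_cases hq <;> simp_all
  by_cases h10 : PySem.Chars.isIn "AE".toList ((PySem.Str.upper t).toList) = true
  · rw [if_neg h0, if_neg h1, if_neg h2, if_neg h3, if_neg h4, if_neg h5, if_neg (by rw [eq_false_of_ne_true h6, eq_false_of_ne_true h7]; decide), if_neg h8, if_neg h9, if_pos h10]
    rw [bestOf_eq ((PySem.Str.upper t).toList) ("AE".toList, 9) (by decide) h10 ?low]
    · rfl
    case low =>
      intro q hq hlt
      fin_cases hq <;> simp_all
  by_cases h11 : PySem.Chars.isIn "VE".toList ((PySem.Str.upper t).toList) = true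
  · rw [if_neg h0, if_neg h1, if_neg h2, if_neg h3, if_neg h4, if_neg h5, if_neg (by rw [eq_false_of_ne_true h6, eq_false_of_ne_true h7]; decide), if_neg h8, if_neg h9, if_neg h10, if_pos h11]
    rw [bestOf_eq ((PySem.Str.upper t).toList) ("VE".toList, 10) (by decide) h11 ?low]
    · rfl
    case low =>
      intro q hq hlt
      fin_cases hq <;> simp_all
  · rw [if_neg h0, if_neg h1, if_neg h2, if_neg h3, if_neg h4, if_neg h5, if_neg (by rw [eq_false_of_ne_true h6, eq_false_of_ne_true h7]; decide), if_neg h8, if_neg h9, if_neg h10, if_neg h11]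
    have hb : bestOf ((PySem.Str.upper t).toList) = 11 := by
      rcases bestOf_cases ((PySem.Str.upper t).toList) with h | ⟨q, hqmem, hq, i, hi, hpre⟩
      · exact h
      · exfalso
        have hocc : PySem.Chars.isIn q.1 ((PySem.Str.upper t).toList) = true :=
          (occ_iff q.1 ((PySem.Str.upper t).toList) (kw_ne_nil q hqmem)).mpr ⟨i, hi, hpre⟩
        fin_cases hqmem <;> simp_all
    rw [hb]
    rfl
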